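-- pv_equiv track=rewrite | github.com/BoB-Sentinel-Solution/Optical-Character-Recognition-Test | smart_ocr.py | pick_pages
-- ===== SOURCE A (Python) =====
-- from typing import List, Tuple, Optional, Dict
--
-- def pick_pages(total: int, policy: str, first_n: int = 3, last_n: int = 1) -> List[int]:
--     if policy == "all":
--         return list(range(total))
--     if policy == "sample":
--         picked = list(range(min(first_n, total)))
--         last_idx = total - 1
--         if last_idx >= 0 and last_idx not in picked:
--             picked.append(last_idx)
--         return picked
--     # "firstN+lastN"
--     picked = list(range(min(first_n, total)))
--     for j in range(1, last_n+1):
--         idx = total - j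
--         if 0 <= idx < total and idx not in picked:
--             picked.append(idx)
--     picked.sort()
--     return picked
-- ===== SOURCE B (Python) =====
-- def pick_pages(total: int, policy: str, first_n: int = 3, last_n: int = 1):
--     if policy == "all":
--         return list(range(total))
--     ln = 1 if policy == "sample" else last_n
--     cut = min(max(first_n, 0), total)        # end of the head block
--     tail_start = max(total - ln, cut, 0)     # start of tail block, clipped past the head
--     return list(range(cut)) + list(range(tail_start, total))
-- ===== Notes on version B (the rewrite author's own statement) =====
-- stated objective: faster
-- what changed: Replaces A's staged construction (build head range, append trailing indices one-by-one under linear membership tests, then sort) by a closed-form computation of the two block boundaries (head cut and overlap-clipped tail start) and a single concatenation of two ranges, already in order with no membership test and no sort.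
import Mathlib
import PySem

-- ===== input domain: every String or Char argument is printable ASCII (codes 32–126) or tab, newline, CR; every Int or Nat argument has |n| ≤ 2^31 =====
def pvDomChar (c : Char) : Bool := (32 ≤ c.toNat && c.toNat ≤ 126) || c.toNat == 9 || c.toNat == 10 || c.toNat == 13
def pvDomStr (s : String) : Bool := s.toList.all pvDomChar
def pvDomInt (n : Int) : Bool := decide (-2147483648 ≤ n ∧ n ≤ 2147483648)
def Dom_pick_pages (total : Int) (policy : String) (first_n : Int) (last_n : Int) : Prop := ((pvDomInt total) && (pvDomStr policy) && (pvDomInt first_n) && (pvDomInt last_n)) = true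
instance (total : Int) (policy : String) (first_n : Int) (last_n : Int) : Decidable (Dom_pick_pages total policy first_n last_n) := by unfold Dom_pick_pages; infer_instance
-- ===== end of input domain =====

-- B replaces A's staged build (head range, membership-tested trailing appends, sort) by a
-- closed-form computation of the two block boundaries (head cut, overlap-clipped tail start)
-- and a concatenation of two ranges; no membership test and no sort.

-- ===== PORT A =====
def pick_pages (total : Int) (policy : String) (first_n : Int) (last_n : Int) : List Int :=
  if policy = "all" then PySem.List.pyRange 0 total 1
  else if policy = "sample" then
    let picked := PySem.List.pyRange 0 (min first_n total) 1
    let last_idx := total - 1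
    if 0 ≤ last_idx ∧ last_idx ∉ picked then picked ++ [last_idx] else picked
  else
    let picked0 := PySem.List.pyRange 0 (min first_n total) 1
    let picked := (PySem.List.pyRange 1 (last_n + 1) 1).foldl
      (fun acc j =>
        let idx := total - j
        if 0 ≤ idx ∧ idx < total ∧ idx ∉ acc then acc ++ [idx] else acc) picked0
    PySem.List.sorted picked (fun x => x) false

-- ===== PORT B =====
def pick_pages_alt (total : Int) (policy : String) (first_n : Int) (last_n : Int) : List Int :=
  if policy = "all" then PySem.List.pyRange 0 total 1
  else
    let ln : Int := if policy = "sample" then 1 else last_n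
    let cut : Int := min (max first_n 0) total
    let tail_start : Int := max (max (total - ln) cut) 0
    PySem.List.pyRange 0 cut 1 ++ PySem.List.pyRange tail_start total 1

-- ===== PRECONDITION & SPEC =====
def Spec_pick_pages (total : Int) (policy : String) (first_n : Int) (last_n : Int) (out : List Int) : Prop := out = pick_pages_alt total policy first_n last_n
instance (total : Int) (policy : String) (first_n : Int) (last_n : Int) (out : List Int) : Decidable (Spec_pick_pages total policy first_n last_n out) := by unfold Spec_pick_pages; infer_instance

-- ===== CLAIM (what is proved, stated in full; the proofs are below) =====
def Claim_equal_pick_pages : Prop := ∀ (total : Int) (policy : String) (first_n : Int) (last_n : Int), Dom_pick_pages total policy first_n last_n → Spec_pick_pages total policy first_n last_n (pick_pages total policy first_n last_n)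

-- ===== LEMMAS AND PROOFS =====

-- B's two-block concatenation, characterised
theorem pvCanon_pairwise (total cut ts : Int) (hct : cut ≤ ts) :
    (PySem.List.pyRange 0 cut 1 ++ PySem.List.pyRange ts total 1).Pairwise (· < ·) := by
  refine List.pairwise_append.2 ⟨PySem.List.pairwise_lt_pyRange_one _ _,
    PySem.List.pairwise_lt_pyRange_one _ _, ?_⟩
  intro a ha b hb
  rw [PySem.List.mem_pyRange_one] at ha hb
  omega

theorem pvCanon_nodup (total cut ts : Int) (hct : cut ≤ ts) :
    (PySem.List.pyRange 0 cut 1 ++ PySem.List.pyRange ts total 1).Nodup :=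
  (pvCanon_pairwise total cut ts hct).imp (fun h => ne_of_lt h)

theorem pvCanon_mem (total cut ts : Int) (x : Int) :
    x ∈ PySem.List.pyRange 0 cut 1 ++ PySem.List.pyRange ts total 1 ↔
    (0 ≤ x ∧ x < cut) ∨ (ts ≤ x ∧ x < total) := by
  simp only [List.mem_append, PySem.List.mem_pyRange_one]

-- a Pairwise-< list with the same members as B's two blocks IS B's concatenation
theorem pvEqCanon (total cut ts : Int) (hct : cut ≤ ts) (l : List Int)
    (hp : l.Pairwise (· < ·))
    (hmem : ∀ x, x ∈ l ↔ (0 ≤ x ∧ x < cut) ∨ (ts ≤ x ∧ x < total)) :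
    l = PySem.List.pyRange 0 cut 1 ++ PySem.List.pyRange ts total 1 := by
  refine PySem.List.eq_of_perm_of_pairwise_le_of_injective (fun x => x)
    (fun a b h => h) ?_ (hp.imp le_of_lt)
    ((pvCanon_pairwise total cut ts hct).imp le_of_lt)
  rw [List.perm_ext_iff_of_nodup (hp.imp (fun h => ne_of_lt h)) (pvCanon_nodup total cut ts hct)]
  intro x
  rw [hmem, pvCanon_mem]

-- invariant of A's trailing-index loop (firstN+lastN branch)
theorem pvFoldA (total m : Int) (n : Nat) :
    ((PySem.List.pyRange 1 (1 + (n : Int)) 1).foldl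
      (fun acc j =>
        let idx := total - j
        if 0 ≤ idx ∧ idx < total ∧ idx ∉ acc then acc ++ [idx] else acc)
      (PySem.List.pyRange 0 m 1)).Nodup ∧
    ∀ x, x ∈ (PySem.List.pyRange 1 (1 + (n : Int)) 1).foldl
      (fun acc j =>
        let idx := total - j
        if 0 ≤ idx ∧ idx < total ∧ idx ∉ acc then acc ++ [idx] else acc)
      (PySem.List.pyRange 0 m 1) ↔
      (0 ≤ x ∧ x < m) ∨ (total - n ≤ x ∧ x < total ∧ 0 ≤ x) := by
  induction n with
  | zero =>
      rw [show ((1 : Int) + (0 : Nat) = 1) by norm_num,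
        PySem.List.pyRange_one_eq_nil (a := 1) (b := 1) (by omega)]
      simp only [List.foldl_nil]
      refine ⟨PySem.List.nodup_pyRange_one _ _, ?_⟩
      intro x
      rw [PySem.List.mem_pyRange_one]
      omega
  | succ k ih =>
      rw [show ((1 : Int) + ((k : Nat) + 1 : Nat) = (1 + (k : Int)) + 1) by push_cast; ring,
        PySem.List.pyRange_one_succ_right (by omega), List.foldl_append, List.foldl_cons,
        List.foldl_nil]
      obtain ⟨ihnd, ihmem⟩ := ih
      set prev := (PySem.List.pyRange 1 (1 + (k : Int)) 1).foldl
        (fun acc j =>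
          let idx := total - j
          if 0 ≤ idx ∧ idx < total ∧ idx ∉ acc then acc ++ [idx] else acc)
        (PySem.List.pyRange 0 m 1) with hprev
      simp only []
      by_cases hc : 0 ≤ total - (1 + (k : Int)) ∧ total - (1 + (k : Int)) < total ∧
          total - (1 + (k : Int)) ∉ prev
      · rw [if_pos hc]
        constructor
        · simp only [List.nodup_append, List.nodup_cons, List.nodup_nil]
          refine ⟨ihnd, by simp, ?_⟩
          intro a ha b hb
          rw [List.mem_singleton] at hb
          subst hb
          intro h
          exact hc.2.2 (h ▸ ha)
        · intro x
          simp only [List.mem_append, List.mem_singleton, ihmem]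
          push_cast
          omega
      · rw [if_neg hc]
        refine ⟨ihnd, ?_⟩
        intro x
        rw [ihmem]
        by_cases hmem : total - (1 + (k : Int)) ∈ prev
        · have := (ihmem (total - (1 + (k : Int)))).1 hmem
          push_cast
          omega
        · have hA : ¬ 0 ≤ total - (1 + (k : Int)) := by
            intro hA
            exact hc ⟨hA, by omega, hmem⟩
          push_cast
          omega

-- ===== VERDICT (by name: the statement is the Claim_ definition above) =====
theorem pick_pages_spec : Claim_equal_pick_pages := by
  unfold Claim_equal_pick_pages
  intro total policy first_n last_n _
  unfold Spec_pick_pages pick_pages pick_pages_alt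
  by_cases hall : policy = "all"
  · rw [if_pos hall, if_pos hall]
  · rw [if_neg hall, if_neg hall]
    by_cases hs : policy = "sample"
    · rw [if_pos hs, if_pos hs]
      simp only []
      by_cases hc : 0 ≤ total - 1 ∧ total - 1 ∉ PySem.List.pyRange 0 (min first_n total) 1
      · rw [if_pos hc]
        have hnm := hc.2
        rw [PySem.List.mem_pyRange_one] at hnm
        refine pvEqCanon total _ _ (by omega) _ ?_ ?_
        · refine List.pairwise_append.2 ⟨PySem.List.pairwise_lt_pyRange_one _ _,
            List.pairwise_singleton _ _, ?_⟩
          intro a ha b hb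
          rw [PySem.List.mem_pyRange_one] at ha
          rw [List.mem_singleton] at hb
          omega
        · intro x
          simp only [List.mem_append, List.mem_singleton, PySem.List.mem_pyRange_one]
          omega
      · rw [if_neg hc]
        refine pvEqCanon total _ _ (by omega) _ (PySem.List.pairwise_lt_pyRange_one _ _) ?_
        intro x
        rw [PySem.List.mem_pyRange_one]
        by_cases hc0 : 0 ≤ total - 1
        · have hmem : total - 1 ∈ PySem.List.pyRange 0 (min first_n total) 1 := by
            by_contra hn
            exact hc ⟨hc0, hn⟩
          rw [PySem.List.mem_pyRange_one] at hmem
          omega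
        · omega
    · rw [if_neg hs, if_neg hs]
      simp only []
      by_cases hln : 0 ≤ last_n
      · have hrw : last_n + 1 = 1 + (last_n.toNat : Int) := by omega
        rw [hrw]
        obtain ⟨hnd, hmem⟩ := pvFoldA total (min first_n total) last_n.toNat
        refine PySem.List.sorted_id_eq_of_perm_of_pairwise _ _ ?_
          ((pvCanon_pairwise total _ _ (by omega)).imp le_of_lt)
        rw [List.perm_ext_iff_of_nodup (pvCanon_nodup total _ _ (by omega)) hnd]
        intro x
        rw [hmem, pvCanon_mem]
        omega
      · rw [PySem.List.pyRange_one_eq_nil (a := 1) (b := last_n + 1) (by omega)]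
        simp only [List.foldl_nil]
        refine PySem.List.sorted_id_eq_of_perm_of_pairwise _ _ ?_
          ((pvCanon_pairwise total _ _ (by omega)).imp le_of_lt)
        rw [List.perm_ext_iff_of_nodup (pvCanon_nodup total _ _ (by omega))
          (PySem.List.nodup_pyRange_one _ _)]
        intro x
        rw [pvCanon_mem, PySem.List.mem_pyRange_one]
        omega
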